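-- pv_equiv track=rewrite | github.com/DatHydroGuy/AdventOfCode | AdventOfCode2024/Python/day22/puzzles.py | part2
-- ===== SOURCE A (Python) =====
-- from collections import defaultdict
-- from itertools import pairwise
--
-- def part2(secret_numbers):
--     change_map = defaultdict(int)
--
--     for secret_number in secret_numbers:
--         number_sequence = [secret_number] + [secret_number := process_secret_number(secret_number) for _ in range(2000)]
--         differences = [num2 % 10 - num1 % 10 for num1, num2 in pairwise(number_sequence)]
--         seen = set()
--         for idx in range(len(number_sequence) - 4):
--             curr_key = tuple(differences[idx: idx + 4])
--             if curr_key in seen: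
--                 continue
--             change_map[curr_key] += number_sequence[idx + 4] % 10
--             seen.add(curr_key)
--
--     return max(change_map.values())
--
-- def process_secret_number(secret_number):
--     # multiply by 64
--     value = secret_number << 6
--     secret_number = mix_and_prune(secret_number, value)
--     # integer divide by 32
--     value = secret_number >> 5
--     secret_number = mix_and_prune(secret_number, value)
--     # multiply by 2048
--     value = secret_number << 11
--     secret_number = mix_and_prune(secret_number, value)
--     return secret_number
--
-- def mix_and_prune(secret_number, value):
--     # mix
--     secret_number ^= value
--     # prune
--     secret_number &= 16777215
--     return secret_number
-- ===== SOURCE B (Python) =====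
-- def mix_and_prune(secret_number, value):
--     secret_number ^= value
--     secret_number &= 16777215
--     return secret_number
--
--
-- def process_secret_number(secret_number):
--     secret_number = mix_and_prune(secret_number, secret_number << 6)
--     secret_number = mix_and_prune(secret_number, secret_number >> 5)
--     secret_number = mix_and_prune(secret_number, secret_number << 11)
--     return secret_number
--
--
-- def part2(secret_numbers):
--     totals = {}
--     for secret in secret_numbers:
--         current = secret
--         prev_price = current % 10
--         window = []
--         seen = set()
--         for _ in range(2000):
--             current = process_secret_number(current)
--             price = current % 10
--             window.append(price - prev_price)
--             if len(window) > 4: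
--                 window.pop(0)
--             prev_price = price
--             if len(window) == 4:
--                 key = tuple(window)
--                 if key not in seen:
--                     seen.add(key)
--                     totals[key] = totals.get(key, 0) + price
--     return max(totals.values())
-- ===== Notes on version B (the rewrite author's own statement) =====
-- stated objective: alternative
-- what changed: Instead of materialising the full 2001-number sequence and a difference list and then slicing 4-windows by index with a second pass, B streams each seed in a single pass of 2000 PRNG steps, maintaining the previous price, a rolling last-4-changes window and a per-seed seen set, updating the global totals dict on first occurrence of each window.
import Mathlib
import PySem

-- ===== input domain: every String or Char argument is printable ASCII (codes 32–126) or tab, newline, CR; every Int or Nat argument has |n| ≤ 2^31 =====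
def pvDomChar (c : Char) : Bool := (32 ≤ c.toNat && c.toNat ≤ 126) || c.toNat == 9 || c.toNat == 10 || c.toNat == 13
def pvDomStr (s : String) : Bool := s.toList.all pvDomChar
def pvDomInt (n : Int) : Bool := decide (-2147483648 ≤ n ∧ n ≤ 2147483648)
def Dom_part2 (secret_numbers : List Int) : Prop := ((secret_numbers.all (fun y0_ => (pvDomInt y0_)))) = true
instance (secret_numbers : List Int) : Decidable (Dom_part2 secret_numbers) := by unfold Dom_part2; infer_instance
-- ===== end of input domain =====

-- B re-implements part2 as a single streaming pass per seed (rolling 4-change window,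
-- no materialised sequence/difference lists); same result, similar cost ("alternative").

-- ===== PORT A =====
-- module helper mix_and_prune (shared by both ports, as in the Python module)
def pvMixAndPrune (secret_number value : Int) : Int :=
  PySem.Int.band (PySem.Int.bxor secret_number value) 16777215

-- module helper process_secret_number (shared by both ports)
def pvProcess (secret_number : Int) : Int :=
  let s1 := pvMixAndPrune secret_number (secret_number <<< 6)
  let s2 := pvMixAndPrune s1 (s1 >>> 5)
  pvMixAndPrune s2 (s2 <<< 11)

-- the walrus list comprehension [secret := process_secret_number(secret) for _ in range(n)]
def pvGenSeq (s : Int) : Nat → List Int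
  | 0 => []
  | n + 1 =>
    let s' := pvProcess s
    s' :: pvGenSeq s' n

-- [num2 % 10 - num1 % 10 for num1, num2 in pairwise(xs)] (pairwise = zip with the tail)
def pvDiffs (xs : List Int) : List Int :=
  (xs.zip xs.tail).map (fun p => PySem.Int.mod p.2 10 - PySem.Int.mod p.1 10)

-- hand port (exact) of the Python dict update `d[k] += p` on an insertion-ordered
-- dict with unique keys, used by BOTH ports (defaultdict increment in A, get+assign in B):
-- first-match scan, add in place, append a fresh key at the end; values = map (·.2).
-- (PySem.Dict has the same semantics; this plain assoc list is used for evaluation speed.)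
def pvBump (d : List (List Int × Int)) (k : List Int) (p : Int) : List (List Int × Int) :=
  if d.any (fun e => e.1 == k) then
    d.map (fun e => if e.1 == k then (e.1, e.2 + p) else e)
  else d ++ [(k, p)]

-- one iteration of A's outer `for secret_number in secret_numbers` loop
-- (the 4-tuple dict key is kept as the length-4 slice itself)
def pvSeedA (d : List (List Int × Int)) (s : Int) : List (List Int × Int) :=
  let seq := [s] ++ pvGenSeq s 2000
  let diffs := pvDiffs seq
  ((PySem.List.pyRange 0 (PySem.List.len seq - 4) 1).foldl
    (fun st idx =>
      let key := PySem.List.slice diffs (some idx) (some (idx + 4))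
      if PySem.Set.contains st.2 key then st
      else (pvBump st.1 key (PySem.Int.mod (PySem.List.pyGetD seq (idx + 4) 0) 10),
            PySem.Set.add st.2 key))
    (d, (PySem.Set.empty : PySem.Set (List Int)))).1

def part2 (secret_numbers : List Int) : Int :=
  let d := secret_numbers.foldl pvSeedA []
  -- max(change_map.values()); none is unreachable under Pre_part2 (nonempty input)
  (PySem.List.max? (d.map (·.2)) (fun v => v)).getD 0

-- ===== PORT B =====
-- B's inner `for _ in range(2000)` loop: state = (current, prev_price, window, seen, totals)
def pvRunSeed : Nat → Int → Int → List Int → PySem.Set (List Int) →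
    List (List Int × Int) → List (List Int × Int)
  | 0, _, _, _, _, d => d
  | n + 1, cur, prev, window, seen, d =>
    let c := pvProcess cur
    let price := PySem.Int.mod c 10
    let w0 := window ++ [price - prev]
    let w := if 4 < w0.length then w0.tail else w0
    if w.length == 4 then
      if PySem.Set.contains seen w then pvRunSeed n c price w seen d
      else pvRunSeed n c price w (PySem.Set.add seen w) (pvBump d w price)
    else pvRunSeed n c price w seen d

def pvSeedB (d : List (List Int × Int)) (s : Int) : List (List Int × Int) :=
  pvRunSeed 2000 s (PySem.Int.mod s 10) [] PySem.Set.empty d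

def part2_alt (secret_numbers : List Int) : Int :=
  let d := secret_numbers.foldl pvSeedB []
  -- max(totals.values()); none is unreachable under Pre_part2 (nonempty input)
  (PySem.List.max? (d.map (·.2)) (fun v => v)).getD 0

-- ===== PRECONDITION & SPEC =====
-- Pre_ excludes only the empty list, on which Python's max() raises ValueError (in A and in B alike).
def Pre_part2 (secret_numbers : List Int) : Prop := secret_numbers ≠ []
instance (secret_numbers : List Int) : Decidable (Pre_part2 secret_numbers) := by
  unfold Pre_part2; infer_instance

def pvWitness_part2 : List Int := [123]

def Spec_part2 (secret_numbers : List Int) (out : Int) : Prop := out = part2_alt secret_numbers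
instance (secret_numbers : List Int) (out : Int) : Decidable (Spec_part2 secret_numbers out) := by
  unfold Spec_part2; infer_instance

-- ===== CLAIM (what is proved, stated in full; the proofs are below) =====
def Claim_equal_part2 : Prop := ∀ (secret_numbers : List Int), Dom_part2 secret_numbers →
  Pre_part2 secret_numbers → Spec_part2 secret_numbers (part2 secret_numbers)

-- ===== LEMMAS AND PROOFS =====

-- the common "first-occurrence update" loop, run over an explicit list of (key, price) events
def pvApply : List (List Int × Int) → PySem.Set (List Int) → List (List Int × Int) →
    List (List Int × Int) × PySem.Set (List Int)
  | [], seen, d => (d, seen)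
  | (k, p) :: es, seen, d =>
    if PySem.Set.contains seen k then pvApply es seen d
    else pvApply es (PySem.Set.add seen k) (pvBump d k p)

-- the event stream of B's loop, with prev threaded exactly as in pvRunSeed
def pvEventsFrom : Nat → Int → Int → List Int → List (List Int × Int)
  | 0, _, _, _ => []
  | n + 1, cur, prev, window =>
    let c := pvProcess cur
    let price := PySem.Int.mod c 10
    let w0 := window ++ [price - prev]
    let w := if 4 < w0.length then w0.tail else w0
    (if w.length == 4 then [(w, price)] else []) ++ pvEventsFrom n c price w

-- the same stream read off a materialised sequence
def pvEvents : List Int → List Int → List (List Int × Int)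
  | x :: y :: rest, w =>
    let price := PySem.Int.mod y 10
    let w0 := w ++ [price - PySem.Int.mod x 10]
    let w' := if 4 < w0.length then w0.tail else w0
    (if w'.length == 4 then [(w', price)] else []) ++ pvEvents (y :: rest) w'
  | _, _ => []

-- the event stream of A's indexed loop
def pvEvIdx (L : List Int) : List (List Int × Int) :=
  (List.range (L.length - 4)).map
    (fun k => (((pvDiffs L).drop k).take 4, PySem.Int.mod (L.getD (k + 4) 0) 10))

def pvWin (l : List Int) : List Int := l.drop (l.length - 4)

theorem pvRunSeed_eq (n : Nat) : ∀ cur prev window seen (d : List (List Int × Int)),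
    pvRunSeed n cur prev window seen d = (pvApply (pvEventsFrom n cur prev window) seen d).1 := by
  induction n with
  | zero => intro cur prev window seen d; rfl
  | succ n ih =>
    intro cur prev window seen d
    simp only [pvRunSeed, pvEventsFrom]
    generalize (if 4 < (window ++ [PySem.Int.mod (pvProcess cur) 10 - prev]).length
        then (window ++ [PySem.Int.mod (pvProcess cur) 10 - prev]).tail
        else window ++ [PySem.Int.mod (pvProcess cur) 10 - prev]) = w
    by_cases h4 : (w.length == 4) = true
    · rw [if_pos h4, if_pos h4, List.singleton_append, pvApply]
      by_cases hc : PySem.Set.contains seen w = true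
      · rw [if_pos hc, if_pos hc, ih]
      · rw [if_neg hc, if_neg hc, ih]
    · rw [if_neg h4, if_neg h4, List.nil_append, ih]

theorem pvEventsFrom_eq (n : Nat) : ∀ cur window,
    pvEventsFrom n cur (PySem.Int.mod cur 10) window = pvEvents (cur :: pvGenSeq cur n) window := by
  induction n with
  | zero => intro cur window; rfl
  | succ n ih =>
    intro cur window
    simp only [pvEventsFrom, pvGenSeq, pvEvents]
    rw [ih]

theorem length_pvGenSeq (n : Nat) : ∀ s, (pvGenSeq s n).length = n := by
  induction n with
  | zero => intro s; rfl
  | succ n ih => intro s; simp [pvGenSeq, ih]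

theorem length_pvDiffs (L : List Int) : (pvDiffs L).length = L.length - 1 := by
  simp [pvDiffs, List.length_zip]

theorem getElem_pvDiffs (L : List Int) (i : Nat) (h : i + 1 < L.length) :
    (pvDiffs L)[i]'(by rw [length_pvDiffs]; omega) =
      PySem.Int.mod (L[i+1]'h) 10 - PySem.Int.mod (L[i]'(by omega)) 10 := by
  simp [pvDiffs, List.getElem_zip, List.getElem_tail]

theorem length_pvWin (l : List Int) : (pvWin l).length = min l.length 4 := by
  simp [pvWin]; omega

theorem pvWin_append (l : List Int) (x : Int) :
    pvWin (l ++ [x]) = if 4 < (pvWin l ++ [x]).length then (pvWin l ++ [x]).tail else pvWin l ++ [x] := by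
  by_cases h : l.length ≤ 3
  · have h0 : l.length - 4 = 0 := by omega
    have h31 : l.length - 3 = 0 := by omega
    have h3 : (l ++ [x]).length - 4 = 0 := by simp; omega
    rw [if_neg (by simp [pvWin, h0]; omega)]
    simp [pvWin, h0, h31]
  · have hlt : 4 < (pvWin l ++ [x]).length := by
      rw [List.length_append, length_pvWin]
      simp only [List.length_cons, List.length_nil]
      omega
    rw [if_pos hlt]
    have he : (l ++ [x]).length - 4 = l.length - 3 := by simp
    have h1 : pvWin (l ++ [x]) = l.drop (l.length - 3) ++ [x] := by
      rw [pvWin, he, List.drop_append_of_le_length (by omega)]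
    have e : l.length - 4 + 1 = l.length - 3 := by omega
    have h2 : pvWin l = l[l.length - 4]'(by omega) :: l.drop (l.length - 3) := by
      rw [pvWin, List.drop_eq_getElem_cons (by omega : l.length - 4 < l.length), e]
    rw [h1, h2]
    simp


theorem length_pvEvIdx (L : List Int) : (pvEvIdx L).length = L.length - 4 := by
  simp [pvEvIdx]

theorem getElem_pvEvIdx (L : List Int) (k : Nat) (h : k < L.length - 4) :
    (pvEvIdx L)[k]'(by rw [length_pvEvIdx]; omega) =
      (((pvDiffs L).drop k).take 4, PySem.Int.mod (L.getD (k + 4) 0) 10) := by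
  simp [pvEvIdx]

theorem pvEvents_drop (L : List Int) : ∀ (n p : Nat), L.length - p ≤ n → p < L.length →
    pvEvents (L.drop p) (pvWin ((pvDiffs L).take p)) = (pvEvIdx L).drop (p - 3) := by
  intro n
  induction n with
  | zero => intro p h hp; omega
  | succ n ih =>
    intro p h hp
    by_cases hp1 : p + 1 < L.length
    · have hd : L.drop p = L[p]'hp :: L[p+1]'hp1 :: L.drop (p+2) := by
        rw [List.drop_eq_getElem_cons hp, List.drop_eq_getElem_cons hp1]
      rw [hd]
      simp only [pvEvents]
      have hDlen : p < (pvDiffs L).length := by rw [length_pvDiffs]; omega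
      have hdiff : PySem.Int.mod (L[p+1]'hp1) 10 - PySem.Int.mod (L[p]'hp) 10 = (pvDiffs L)[p]'hDlen := by
        rw [getElem_pvDiffs L p hp1]
      rw [hdiff]
      have htake : (pvDiffs L).take (p+1) = (pvDiffs L).take p ++ [(pvDiffs L)[p]'hDlen] := by
        rw [List.take_add_one]
        simp [List.getElem?_eq_getElem hDlen]
      have hwin : (if 4 < (pvWin ((pvDiffs L).take p) ++ [(pvDiffs L)[p]'hDlen]).length
                   then (pvWin ((pvDiffs L).take p) ++ [(pvDiffs L)[p]'hDlen]).tail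
                   else pvWin ((pvDiffs L).take p) ++ [(pvDiffs L)[p]'hDlen])
                  = pvWin ((pvDiffs L).take (p+1)) := by
        rw [htake, pvWin_append]
      rw [hwin]
      have hrest : L[p+1]'hp1 :: L.drop (p+2) = L.drop (p+1) := (List.drop_eq_getElem_cons hp1).symm
      rw [hrest, ih (p+1) (by omega) (by omega)]
      have hwl : (pvWin ((pvDiffs L).take (p+1))).length = min (p+1) 4 := by
        rw [length_pvWin, List.length_take, length_pvDiffs]
        omega
      by_cases h3 : 3 ≤ p
      · have hcond : ((pvWin ((pvDiffs L).take (p+1))).length == 4) = true := by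
          rw [hwl]; simp; omega
        rw [if_pos hcond]
        have hidx : p - 3 < (pvEvIdx L).length := by rw [length_pvEvIdx]; omega
        rw [List.drop_eq_getElem_cons hidx, getElem_pvEvIdx L (p-3) (by omega),
            show p - 3 + 1 = p - 2 by omega]
        have hgd : L.getD (p - 3 + 4) 0 = L[p+1]'hp1 := by
          rw [show p - 3 + 4 = p + 1 by omega]
          exact List.getD_eq_getElem L 0 hp1
        have hkey : pvWin ((pvDiffs L).take (p+1)) = ((pvDiffs L).drop (p-3)).take 4 := by
          rw [pvWin, List.length_take, length_pvDiffs,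
              show min (p+1) (L.length - 1) - 4 = p - 3 by omega,
              List.drop_take, show p + 1 - (p-3) = 4 by omega]
        rw [hgd, hkey]
        simp
      · have hcond : ¬ (((pvWin ((pvDiffs L).take (p+1))).length == 4) = true) := by
          rw [hwl]; simp; omega
        rw [if_neg hcond, List.nil_append, show p + 1 - 3 = p - 2 by omega, show p - 3 = p - 2 by omega]
    · have hd : L.drop p = [L[p]'hp] := by
        rw [List.drop_eq_getElem_cons hp, List.drop_eq_nil_of_le (by omega)]
      rw [hd]
      have hnil : pvEvents [L[p]'hp] (pvWin ((pvDiffs L).take p)) = [] := rfl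
      rw [hnil]
      rw [List.drop_eq_nil_of_le (by rw [length_pvEvIdx]; omega)]

theorem pvFoldA_eq (seq diffs : List Int) : ∀ (l : List Int) (d : List (List Int × Int)) seen,
    l.foldl
      (fun st idx =>
        let key := PySem.List.slice diffs (some idx) (some (idx + 4))
        if PySem.Set.contains st.2 key then st
        else (pvBump st.1 key (PySem.Int.mod (PySem.List.pyGetD seq (idx + 4) 0) 10),
              PySem.Set.add st.2 key))
      (d, seen)
    = pvApply (l.map (fun idx =>
        (PySem.List.slice diffs (some idx) (some (idx + 4)),
         PySem.Int.mod (PySem.List.pyGetD seq (idx + 4) 0) 10))) seen d := by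
  intro l
  induction l with
  | nil => intro d seen; rfl
  | cons idx rest ih =>
    intro d seen
    simp only [List.foldl_cons, List.map_cons, pvApply]
    by_cases hc : PySem.Set.contains seen (PySem.List.slice diffs (some idx) (some (idx + 4))) = true
    · rw [if_pos hc, if_pos hc, ih]
    · rw [if_neg hc, if_neg hc, ih]

theorem pvMapRange_eq (L : List Int) :
    (PySem.List.pyRange 0 (PySem.List.len L - 4) 1).map (fun idx =>
        (PySem.List.slice (pvDiffs L) (some idx) (some (idx + 4)),
         PySem.Int.mod (PySem.List.pyGetD L (idx + 4) 0) 10)) = pvEvIdx L := by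
  unfold pvEvIdx
  rw [PySem.List.len_eq, PySem.List.pyRange_one]
  have hn : (((L.length : Int) - 4) - 0).toNat = L.length - 4 := by omega
  rw [hn, List.map_map]
  apply List.map_congr_left
  intro k hk
  simp only [Function.comp_apply, zero_add]
  rw [show (k : Int) + 4 = ((k + 4 : Nat) : Int) by push_cast; ring]
  rw [PySem.List.slice_natCast, PySem.List.pyGetD_natCast]
  have h4 : k + 4 - k = 4 := by omega
  rw [h4]

theorem pvSeedBody_eq (N : Nat) (d : List (List Int × Int)) (s : Int) :
    ((PySem.List.pyRange 0 (PySem.List.len ([s] ++ pvGenSeq s N) - 4) 1).foldl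
      (fun st idx =>
        let key := PySem.List.slice (pvDiffs ([s] ++ pvGenSeq s N)) (some idx) (some (idx + 4))
        if PySem.Set.contains st.2 key then st
        else (pvBump st.1 key
                (PySem.Int.mod (PySem.List.pyGetD ([s] ++ pvGenSeq s N) (idx + 4) 0) 10),
              PySem.Set.add st.2 key))
      (d, (PySem.Set.empty : PySem.Set (List Int)))).1
    = pvRunSeed N s (PySem.Int.mod s 10) [] PySem.Set.empty d := by
  rw [pvRunSeed_eq, pvEventsFrom_eq, pvFoldA_eq, pvMapRange_eq]
  have hlen : ([s] ++ pvGenSeq s N).length = N + 1 := by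
    simp [length_pvGenSeq]
  have h0 : pvEvents ([s] ++ pvGenSeq s N) [] = pvEvIdx ([s] ++ pvGenSeq s N) := by
    have h := pvEvents_drop ([s] ++ pvGenSeq s N) (N + 1) 0 (by omega) (by omega)
    simpa [pvWin] using h
  rw [← h0, List.singleton_append]

theorem pvSeedA_fun : pvSeedA = fun d s =>
    ((PySem.List.pyRange 0 (PySem.List.len ([s] ++ pvGenSeq s 2000) - 4) 1).foldl
      (fun st idx =>
        let key := PySem.List.slice (pvDiffs ([s] ++ pvGenSeq s 2000)) (some idx) (some (idx + 4))
        if PySem.Set.contains st.2 key then st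
        else (pvBump st.1 key
                (PySem.Int.mod (PySem.List.pyGetD ([s] ++ pvGenSeq s 2000) (idx + 4) 0) 10),
              PySem.Set.add st.2 key))
      (d, (PySem.Set.empty : PySem.Set (List Int)))).1 := rfl

theorem pvSeedB_fun : pvSeedB = fun d s =>
    pvRunSeed 2000 s (PySem.Int.mod s 10) [] PySem.Set.empty d := rfl

theorem pvSeed_eq (d : List (List Int × Int)) (s : Int) : pvSeedA d s = pvSeedB d s := by
  rw [pvSeedA_fun, pvSeedB_fun]
  exact pvSeedBody_eq 2000 d s

-- ===== VERDICT (by name: the statement is the Claim_ definition above) =====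
theorem part2_spec : Claim_equal_part2 := by
  intro sn _ _
  unfold Spec_part2 part2 part2_alt
  have h : pvSeedA = pvSeedB := funext fun d => funext fun s => pvSeed_eq d s
  rw [h]
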